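-- pv_equiv track=rewrite | github.com/FireWorks-Studios/Matchbox | Software/SchemtaicHelper/AutoSchemtic.py | extract_pins_per_M100
-- ===== SOURCE A (Python) =====
-- def extract_pins_per_M100(config, keyboard_mapping):
--     # Extract the keys to map on the M100 component
--     keys_to_map = config['premap']
--
--     # Create a list of pins needed to be attached to each M100 component
--     pins_needed = []
--     for key in keys_to_map:
--         if key in keyboard_mapping['mapping']:
--             pins_needed.extend(keyboard_mapping['mapping'][key])
--
--     # Split the pins into groups of 10 for each M100 component
--     pins_per_M100 = [pins_needed[i:i + 10] for i in range(0, len(pins_needed), 10)]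
--     return pins_per_M100
-- ===== SOURCE B (Python) =====
-- def extract_pins_per_M100(config, keyboard_mapping):
--     # Single pass: chunk pins into groups of 10 on the fly, no intermediate flat list.
--     mapping = keyboard_mapping['mapping']
--     groups = []
--     current = []
--     for key in config['premap']:
--         if key in mapping:
--             for pin in mapping[key]:
--                 current.append(pin)
--                 if len(current) == 10:
--                     groups.append(current)
--                     current = []
--     if current:
--         groups.append(current)
--     return groups
-- ===== Notes on version B (the rewrite author's own statement) =====
-- stated objective: alternative
-- what changed: B fuses collection and chunking into one pass: it streams each mapped pin into a current group, flushing the group to the result whenever it reaches 10, instead of first building the full flat pin list and then slicing it with a range comprehension.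
-- outside the precondition, e.g. on extract_pins_per_M100({'premap': []}, {}): A returns [], B raises KeyError
import Mathlib
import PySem

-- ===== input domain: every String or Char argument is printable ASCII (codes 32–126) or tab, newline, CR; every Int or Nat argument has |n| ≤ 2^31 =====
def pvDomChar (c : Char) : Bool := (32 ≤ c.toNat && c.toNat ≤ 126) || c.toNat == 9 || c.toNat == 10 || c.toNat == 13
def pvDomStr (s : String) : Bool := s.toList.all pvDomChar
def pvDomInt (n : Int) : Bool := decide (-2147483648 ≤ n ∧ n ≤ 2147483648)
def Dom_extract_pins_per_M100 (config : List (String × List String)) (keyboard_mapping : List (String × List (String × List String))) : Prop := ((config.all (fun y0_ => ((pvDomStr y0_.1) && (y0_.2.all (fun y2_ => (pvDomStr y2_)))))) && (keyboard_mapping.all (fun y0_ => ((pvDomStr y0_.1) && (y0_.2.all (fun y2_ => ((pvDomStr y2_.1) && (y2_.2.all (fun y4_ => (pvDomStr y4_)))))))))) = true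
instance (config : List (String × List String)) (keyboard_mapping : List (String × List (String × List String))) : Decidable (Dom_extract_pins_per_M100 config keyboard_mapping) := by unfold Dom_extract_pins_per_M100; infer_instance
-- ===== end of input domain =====

-- B fuses collection and chunking into one streaming pass with a current group flushed at size 10,
-- instead of A's flat pin list followed by a range/slice comprehension; return values agree on Pre_.

-- ===== PORT A =====
def extract_pins_per_M100 (config : List (String × List String)) (keyboard_mapping : List (String × List (String × List String))) : List (List String) :=
  let keys_to_map := ((PySem.Dict.mk config).get? "premap").getD []
  let mapping := PySem.Dict.mk (((PySem.Dict.mk keyboard_mapping).get? "mapping").getD [])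
  let pins_needed := keys_to_map.foldl
    (fun acc key => if mapping.contains key then acc ++ mapping.getD key [] else acc) []
  (PySem.List.pyRange 0 (pins_needed.length : Int) 10).map
    (fun i => PySem.List.slice pins_needed (some i) (some (i + 10)))

-- ===== PORT B =====
-- one pin of B's stream: append to the current group, flush the group when it reaches 10
def pvStep (st : List (List String) × List String) (p : String) : List (List String) × List String :=
  let cur := st.2 ++ [p]
  if cur.length = 10 then (st.1 ++ [cur], []) else (st.1, cur)

def extract_pins_per_M100_alt (config : List (String × List String)) (keyboard_mapping : List (String × List (String × List String))) : List (List String) :=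
  let mapping := PySem.Dict.mk (((PySem.Dict.mk keyboard_mapping).get? "mapping").getD [])
  let st := (((PySem.Dict.mk config).get? "premap").getD []).foldl
    (fun st key => if mapping.contains key then (mapping.getD key []).foldl pvStep st else st)
    ([], [])
  st.1 ++ (if st.2 = [] then [] else [st.2])

-- ===== PRECONDITION & SPEC =====
-- Pre_ requires the 'premap' and 'mapping' keys (a missing one raises KeyError in A); it thereby also
-- excludes the corner where 'premap' maps to [] and 'mapping' is absent, where A returns [] only
-- because its lookup of 'mapping' sits inside a loop that never runs, while B's natural single
-- up-front lookup raises KeyError there.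
def Pre_extract_pins_per_M100 (config : List (String × List String)) (keyboard_mapping : List (String × List (String × List String))) : Prop :=
  ((PySem.Dict.mk config).get? "premap").isSome = true ∧
  ((PySem.Dict.mk keyboard_mapping).get? "mapping").isSome = true
instance (config : List (String × List String)) (keyboard_mapping : List (String × List (String × List String))) : Decidable (Pre_extract_pins_per_M100 config keyboard_mapping) := by unfold Pre_extract_pins_per_M100; infer_instance

def pvWitness_extract_pins_per_M100 : (List (String × List String)) × (List (String × List (String × List String))) :=
  ([("premap", ["a", "b"])], [("mapping", [("a", ["p1", "p2"]), ("c", ["p3"])])])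

def Spec_extract_pins_per_M100 (config : List (String × List String)) (keyboard_mapping : List (String × List (String × List String))) (out : List (List String)) : Prop := out = extract_pins_per_M100_alt config keyboard_mapping
instance (config : List (String × List String)) (keyboard_mapping : List (String × List (String × List String))) (out : List (List String)) : Decidable (Spec_extract_pins_per_M100 config keyboard_mapping out) := by unfold Spec_extract_pins_per_M100; infer_instance

-- ===== CLAIM (what is proved, stated in full; the proofs are below) =====
def Claim_equal_extract_pins_per_M100 : Prop := ∀ (config : List (String × List String)) (keyboard_mapping : List (String × List (String × List String))), Dom_extract_pins_per_M100 config keyboard_mapping → Pre_extract_pins_per_M100 config keyboard_mapping → Spec_extract_pins_per_M100 config keyboard_mapping (extract_pins_per_M100 config keyboard_mapping)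

-- ===== LEMMAS AND PROOFS =====

-- the common mathematical value: the list split into groups of 10
def pvChunks10 (l : List String) : List (List String) :=
  if h : l = [] then [] else l.take 10 :: pvChunks10 (l.drop 10)
  termination_by l.length
  decreasing_by
    have := List.length_pos_of_ne_nil h
    simp only [List.length_drop]
    omega

theorem pvChunks10_nil : pvChunks10 [] = [] := by
  unfold pvChunks10; simp

theorem pvChunks10_ne (l : List String) (h : l ≠ []) :
    pvChunks10 l = l.take 10 :: pvChunks10 (l.drop 10) := by
  conv_lhs => unfold pvChunks10
  simp [h]

theorem pvSlice10 (xs : List String) (k : Nat) :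
    PySem.List.slice xs (some (0 + 10 * (k : Int))) (some (0 + 10 * (k : Int) + 10))
      = List.take 10 (List.drop (10 * k) xs) := by
  have h := PySem.List.slice_natCast_add xs (10 * k) 10
  have e1 : (0 + 10 * (k : Int)) = ((10 * k : Nat) : Int) := by push_cast; ring
  rw [e1]; exact_mod_cast h

theorem pvA_aux (n : Nat) (l : List String) (hn : n = (l.length + 9) / 10) :
    (List.range n).map (fun k => List.take 10 (List.drop (10 * k) l)) = pvChunks10 l := by
  induction n generalizing l with
  | zero =>
    have hl : l.length = 0 := by omega
    have : l = [] := List.length_eq_zero_iff.mp hl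
    simp [this, pvChunks10_nil]
  | succ n ih =>
    have hpos : 0 < l.length := by omega
    have hne : l ≠ [] := List.ne_nil_of_length_pos hpos
    rw [List.range_succ_eq_map, List.map_cons, List.map_map]
    rw [pvChunks10_ne l hne]
    simp only [Nat.mul_zero, List.drop_zero]
    congr 1
    have hpt : ∀ k : Nat, ((fun k => List.take 10 (List.drop (10 * k) l)) ∘ Nat.succ) k
        = (fun k => List.take 10 (List.drop (10 * k) (l.drop 10))) k := by
      intro k
      simp only [Function.comp]
      rw [List.drop_drop]
      congr 2
      omega
    rw [List.map_congr_left (fun k _ => hpt k)]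
    exact ih (l.drop 10) (by simp only [List.length_drop]; omega)

-- A's range/slice comprehension computes pvChunks10
theorem pvA_chunks (l : List String) :
    (PySem.List.pyRange 0 (l.length : Int) 10).map
      (fun i => PySem.List.slice l (some i) (some (i + 10))) = pvChunks10 l := by
  rw [PySem.List.pyRange_of_pos 0 (l.length : Int) (by norm_num), List.map_map]
  have hm : (if (0 : Int) < (l.length : Int) then (((l.length : Int) - 0 + 10 - 1) / 10).toNat else 0)
      = (l.length + 9) / 10 := by
    split_ifs with h <;> omega
  rw [hm]
  have hpt : ∀ k : Nat, ((fun i => PySem.List.slice l (some i) (some (i + 10))) ∘ fun k : Nat => 0 + 10 * (k : Int)) k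
      = (fun k => List.take 10 (List.drop (10 * k) l)) k := by
    intro k
    simp only [Function.comp]
    exact pvSlice10 l k
  rw [List.map_congr_left (fun k _ => hpt k)]
  exact pvA_aux _ l rfl

-- B's streaming fold computes pvChunks10 (accumulator and current group generalized)
theorem pvB_fold (l : List String) (res : List (List String)) (cur : List String)
    (h : cur.length < 10) :
    (l.foldl pvStep (res, cur)).1 ++
      (if (l.foldl pvStep (res, cur)).2 = [] then [] else [(l.foldl pvStep (res, cur)).2])
      = res ++ pvChunks10 (cur ++ l) := by
  induction l generalizing res cur with
  | nil =>
    simp only [List.foldl_nil, List.append_nil]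
    by_cases hc : cur = []
    · simp [hc, pvChunks10_nil]
    · rw [pvChunks10_ne cur hc]
      rw [List.take_of_length_le (by omega), List.drop_eq_nil_of_le (by omega)]
      simp [hc, pvChunks10_nil]
  | cons p t ih =>
    simp only [List.foldl_cons]
    have hstep : pvStep (res, cur) p
        = if (cur ++ [p]).length = 10 then (res ++ [cur ++ [p]], []) else (res, cur ++ [p]) := rfl
    rw [hstep]
    by_cases h10 : (cur ++ [p]).length = 10
    · rw [if_pos h10]
      rw [ih (res ++ [cur ++ [p]]) [] (by norm_num)]
      rw [show cur ++ p :: t = (cur ++ [p]) ++ t by simp]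
      rw [pvChunks10_ne ((cur ++ [p]) ++ t) (by simp)]
      rw [List.take_left' h10, List.drop_left' h10]
      simp
    · rw [if_neg h10]
      rw [ih res (cur ++ [p]) (by simp at h10 ⊢; omega)]
      simp

-- A's flat pin list, with the accumulator generalized
theorem pvFlat_acc (c : String → Bool) (m : String → List String) (keys : List String)
    (acc : List String) :
    keys.foldl (fun a k => if c k then a ++ m k else a) acc
      = acc ++ keys.foldl (fun a k => if c k then a ++ m k else a) [] := by
  induction keys generalizing acc with
  | nil => simp
  | cons k t ih =>
    simp only [List.foldl_cons]
    by_cases hc : c k = true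
    · simp only [hc, if_pos]
      rw [ih (acc ++ m k), ih (([] : List String) ++ m k)]
      simp
    · simp only [if_neg hc]; exact ih acc

-- B's key loop equals folding pvStep over A's flat pin list
theorem pvB_keys (c : String → Bool) (m : String → List String) (keys : List String)
    (st : List (List String) × List String) :
    keys.foldl (fun st k => if c k then (m k).foldl pvStep st else st) st
      = (keys.foldl (fun a k => if c k then a ++ m k else a) []).foldl pvStep st := by
  induction keys generalizing st with
  | nil => simp
  | cons k t ih =>
    simp only [List.foldl_cons]
    by_cases hc : c k = true
    · simp only [hc, if_pos]
      rw [ih ((m k).foldl pvStep st)]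
      rw [pvFlat_acc c m t (([] : List String) ++ m k)]
      simp [List.foldl_append]
    · simp [hc, ih]

-- ===== VERDICT (by name: the statement is the Claim_ definition above) =====
theorem extract_pins_per_M100_spec : Claim_equal_extract_pins_per_M100 := by
  intro config km _ _
  unfold Spec_extract_pins_per_M100
  simp only [extract_pins_per_M100, extract_pins_per_M100_alt]
  rw [pvA_chunks]
  rw [pvB_keys (fun k => (PySem.Dict.mk (((PySem.Dict.mk km).get? "mapping").getD [])).contains k)
      (fun k => (PySem.Dict.mk (((PySem.Dict.mk km).get? "mapping").getD [])).getD k []) _ ([], [])]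
  rw [pvB_fold _ [] [] (by norm_num)]
  simp
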